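-- pv_equiv track=rewrite | github.com/ahoop004/F110_MARL | run.py | _prune_option
-- ===== SOURCE A (Python) =====
-- from typing import Any, Dict, List, Optional, Sequence, Tuple
--
-- def _prune_option(args: List[str], option: str) -> List[str]:
--     cleaned: List[str] = []
--     skip_next = False
--     prefix = f"{option}="
--     for token in args:
--         if skip_next:
--             skip_next = False
--             continue
--         if token == option:
--             skip_next = True
--             continue
--         if token.startswith(prefix):
--             continue
--         cleaned.append(token)
--     return cleaned
-- ===== SOURCE B (Python) =====
-- def _prune_option(args, option):
--     out = list(args)
--     while option in out:
--         i = out.index(option)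
--         del out[i:i+2]
--     prefix = f"{option}="
--     return [t for t in out if not t.startswith(prefix)]
-- ===== Notes on version B (the rewrite author's own statement) =====
-- stated objective: alternative
-- what changed: Replaces A's single-pass skip_next state machine with repeated search-and-delete (find the first exact option occurrence, delete it and its value with del out[i:i+2], repeat) followed by a separate filter pass that drops option=-prefixed tokens.
import Mathlib
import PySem

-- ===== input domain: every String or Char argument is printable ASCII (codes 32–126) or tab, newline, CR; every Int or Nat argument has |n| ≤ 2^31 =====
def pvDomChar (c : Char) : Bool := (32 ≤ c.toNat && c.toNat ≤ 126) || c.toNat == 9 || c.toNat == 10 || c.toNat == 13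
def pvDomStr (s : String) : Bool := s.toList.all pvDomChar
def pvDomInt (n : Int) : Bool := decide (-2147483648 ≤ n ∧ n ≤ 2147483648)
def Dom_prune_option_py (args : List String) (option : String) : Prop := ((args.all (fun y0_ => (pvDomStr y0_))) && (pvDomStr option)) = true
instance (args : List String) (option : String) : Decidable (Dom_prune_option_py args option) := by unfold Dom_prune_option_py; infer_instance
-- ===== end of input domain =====

-- B replaces A's single-pass skip_next state machine with repeated search-and-delete of option/value pairs followed by a separate prefix-filter pass (alternative algorithm, same result).

-- ===== PORT A =====
-- for token in args: carry (cleaned, skip_next); branches in A's order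
def prune_option_py (args : List String) (option : String) : List String :=
  let pfx := option ++ "="      -- f"{option}="
  (args.foldl (fun (st : List String × Bool) token =>
      if st.2 then (st.1, false)
      else if token == option then (st.1, true)
      else if PySem.Str.startswith token pfx then (st.1, false)
      else (st.1 ++ [token], false))
    (([] : List String), false)).1

-- ===== PORT B =====
-- while option in out: i = out.index(option); del out[i:i+2]
-- ('option in out' + 'out.index(option)' together are exactly 'index? = some i';
--  del out[i:i+2] deletes the slice: take i ++ drop (i+2))
def pruneLoopB (option : String) (out : List String) : List String :=
  if h : (PySem.List.index? out option).isSome then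
    let i := (PySem.List.index? out option).get h
    pruneLoopB option (out.take i ++ out.drop (i + 2))
  else out
termination_by out.length
decreasing_by
  obtain ⟨hk, _, _⟩ := PySem.List.getElem_of_index?_eq_some (Option.some_get h).symm
  simp only [List.length_append, List.length_take, List.length_drop]
  omega

def prune_option_py_alt (args : List String) (option : String) : List String :=
  let pfx := option ++ "="      -- f"{option}="
  (pruneLoopB option args).filter (fun t => !(PySem.Str.startswith t pfx))

-- ===== PRECONDITION & SPEC =====
def Spec_prune_option_py (args : List String) (option : String) (out : List String) : Prop := out = prune_option_py_alt args option
instance (args : List String) (option : String) (out : List String) : Decidable (Spec_prune_option_py args option out) := by unfold Spec_prune_option_py; infer_instance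

-- ===== CLAIM (what is proved, stated in full; the proofs are below) =====
def Claim_equal_prune_option_py : Prop := ∀ (args : List String) (option : String), Dom_prune_option_py args option → Spec_prune_option_py args option (prune_option_py args option)

-- ===== LEMMAS AND PROOFS =====

-- cons-building reference form of A's loop, generic in the two token tests
def pruneRefGo (isOpt isPfx : String → Bool) : List String → Bool → List String
  | [], _ => []
  | _ :: rest, true => pruneRefGo isOpt isPfx rest false
  | t :: rest, false =>
      if isOpt t then pruneRefGo isOpt isPfx rest true
      else if isPfx t then pruneRefGo isOpt isPfx rest false
      else t :: pruneRefGo isOpt isPfx rest false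

lemma foldlA_eq_refGo (isOpt isPfx : String → Bool) :
    ∀ (l : List String) (acc : List String) (skip : Bool),
      (l.foldl (fun (st : List String × Bool) token =>
          if st.2 then (st.1, false)
          else if isOpt token then (st.1, true)
          else if isPfx token then (st.1, false)
          else (st.1 ++ [token], false)) (acc, skip)).1
        = acc ++ pruneRefGo isOpt isPfx l skip := by
  intro l
  induction l with
  | nil => intro acc skip; simp [pruneRefGo]
  | cons t rest ih =>
      intro acc skip
      cases skip with
      | true => simp [pruneRefGo, ih]
      | false =>
          by_cases ho : isOpt t
          · simp [pruneRefGo, ho, ih]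
          · by_cases hp : isPfx t
            · simp [pruneRefGo, ho, hp, ih]
            · simp [pruneRefGo, ho, hp, ih]

lemma refGo_true_eq_tail (isOpt isPfx : String → Bool) (l : List String) :
    pruneRefGo isOpt isPfx l true = pruneRefGo isOpt isPfx l.tail false := by
  cases l <;> simp [pruneRefGo]

-- a run of option-free tokens is just prefix-filtered by A's loop
lemma refGo_noopt_append (option : String) (isPfx : String → Bool) :
    ∀ (a r : List String), option ∉ a →
      pruneRefGo (fun t => t == option) isPfx (a ++ r) false
        = a.filter (fun t => !isPfx t) ++ pruneRefGo (fun t => t == option) isPfx r false := by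
  intro a
  induction a with
  | nil => intro r _; simp
  | cons t rest ih =>
      intro r hno
      have hne : (t == option) = false := by
        simp only [List.mem_cons, not_or] at hno
        exact beq_eq_false_iff_ne.mpr (fun he => hno.1 he.symm)
      have hrest : option ∉ rest := by
        simp only [List.mem_cons, not_or] at hno; exact hno.2
      by_cases hp : isPfx t
      · simp [pruneRefGo, hne, hp, List.filter, ih _ hrest]
      · simp [pruneRefGo, hne, hp, List.filter, ih _ hrest]

-- B's loop + filter computes exactly A's reference loop
lemma B_eq_refGo (option : String) :
    ∀ (n : Nat) (out : List String), out.length ≤ n →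
      (pruneLoopB option out).filter
          (fun t => !(PySem.Str.startswith t (option ++ "=")))
        = pruneRefGo (fun t => t == option)
            (fun t => PySem.Str.startswith t (option ++ "=")) out false := by
  intro n
  induction n with
  | zero =>
      intro out hlen
      have : out = [] := List.eq_nil_of_length_eq_zero (by omega)
      subst this
      have hnone : PySem.List.index? ([] : List String) option = none :=
        (PySem.List.index?_eq_none_iff _ _).mpr (by simp)
      rw [pruneLoopB.eq_def, hnone]
      simp [pruneRefGo]
  | succ n ih =>
      intro out hlen
      match h : PySem.List.index? out option with
      | none =>
          rw [pruneLoopB.eq_def, h]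
          simp only [Option.isSome_none, Bool.false_eq_true, dite_false]
          have hno : option ∉ out := (PySem.List.index?_eq_none_iff out option).mp h
          have := refGo_noopt_append option
            (fun t => PySem.Str.startswith t (option ++ "=")) out [] hno
          simpa [pruneRefGo] using this.symm
      | some i =>
          obtain ⟨pre, suf, hdecomp, hpre, hnotin⟩ :=
            (PySem.List.index?_eq_some_iff out option i).mp h
          have htake : out.take i = pre := by
            subst hdecomp; rw [← hpre]
            simp
          have hdrop : out.drop (i + 2) = suf.tail := by
            subst hdecomp
            rw [show i + 2 = pre.length + 2 by omega, List.drop_append]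
            simp [List.drop_one]
          rw [pruneLoopB.eq_def, h]
          simp only [Option.isSome_some, Option.get_some, dite_true]
          rw [htake, hdrop]
          have hlen2 : (pre ++ suf.tail).length ≤ n := by
            subst hdecomp
            simp only [List.length_append] at hlen ⊢
            have htl : suf.tail.length ≤ suf.length := by
              cases suf <;> simp
            simp only [List.length_cons] at hlen
            omega
          rw [ih _ hlen2]
          rw [refGo_noopt_append option _ pre suf.tail hnotin]
          subst hdecomp
          rw [refGo_noopt_append option _ pre (option :: suf) hnotin]
          have : pruneRefGo (fun t => t == option)
              (fun t => PySem.Str.startswith t (option ++ "=")) (option :: suf) false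
              = pruneRefGo (fun t => t == option)
                (fun t => PySem.Str.startswith t (option ++ "=")) suf.tail false := by
            simp only [pruneRefGo, beq_self_eq_true, if_pos]
            exact refGo_true_eq_tail _ _ suf
          rw [this]

-- ===== VERDICT (by name: the statement is the Claim_ definition above) =====
theorem prune_option_py_spec : Claim_equal_prune_option_py := by
  intro args option _
  unfold Spec_prune_option_py prune_option_py prune_option_py_alt
  rw [foldlA_eq_refGo (fun t => t == option) (fun t => PySem.Str.startswith t (option ++ "="))]
  rw [B_eq_refGo option args.length args (le_refl _)]
  simp
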